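-- pv_equiv track=rewrite | github.com/lizkaboriska/shri-homework-4-devtools | 3-coverage/analyze-coverage-unused.py | sum_of_intersection
-- ===== SOURCE A (Python) =====
-- DEL = 0
--
-- ADD = 1
--
-- def sum_of_intersection(script):
-- 	points = []
-- 	for r in script["ranges"]:
-- 		points.append((r["start"], ADD))
-- 		points.append((r["end"], DEL))
--
-- 	answer = 0
--
-- 	cnt = 0
-- 	start_of_cover = None
-- 	for pnt in sorted(points):
-- 		current = pnt[0]
--
-- 		if pnt[1] == ADD:
-- 			cnt += 1
-- 		if pnt[1] == DEL:
-- 			cnt -= 1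
--
-- 		if cnt > 0 and start_of_cover == None:
-- 			start_of_cover = current
-- 		if cnt == 0 and start_of_cover != None:
-- 			answer += current - start_of_cover
-- 			start_of_cover = None
--
-- 	return answer
-- ===== SOURCE B (Python) =====
-- def sum_of_intersection(script):
--     ranges = script["ranges"]
--     starts = [r["start"] for r in ranges]
--     ends = [r["end"] for r in ranges]
--     points = sorted(set(starts + ends))
--     total = 0
--     for p, q in zip(points, points[1:]):
--         if sum(1 for s in starts if s <= p) > sum(1 for e in ends if e <= p):
--             total += q - p
--     return total
-- ===== Notes on version B (the rewrite author's own statement) =====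
-- stated objective: alternative
-- what changed: A sweeps a sorted list of tagged (coordinate, ADD/DEL) events with a running counter and an open-interval register; B instead sorts the distinct endpoints once and, for each gap between adjacent endpoints, adds its width when the count of starts <= left endpoint exceeds the count of ends <= left endpoint.
import Mathlib
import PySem

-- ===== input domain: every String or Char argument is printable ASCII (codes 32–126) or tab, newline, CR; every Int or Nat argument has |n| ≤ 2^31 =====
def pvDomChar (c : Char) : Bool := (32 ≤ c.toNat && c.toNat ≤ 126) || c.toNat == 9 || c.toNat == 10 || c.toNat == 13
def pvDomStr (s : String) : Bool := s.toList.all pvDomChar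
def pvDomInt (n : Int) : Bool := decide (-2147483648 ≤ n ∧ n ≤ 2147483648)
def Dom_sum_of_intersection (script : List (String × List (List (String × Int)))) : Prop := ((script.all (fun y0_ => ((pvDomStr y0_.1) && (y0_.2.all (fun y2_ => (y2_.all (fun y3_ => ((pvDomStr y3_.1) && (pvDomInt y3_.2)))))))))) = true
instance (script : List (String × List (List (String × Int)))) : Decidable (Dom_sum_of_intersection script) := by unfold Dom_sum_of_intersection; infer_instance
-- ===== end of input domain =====

-- B replaces A's tagged-endpoint counter sweep by a per-gap coverage test over the sorted distinct
-- endpoints (objective: alternative — B is shorter but does more comparisons per gap).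

-- ===== PORT A =====
-- the loop body of A's sweep over the sorted (coordinate, tag) events (tags: ADD = 1, DEL = 0)
def pvA_step (st : Int × Int × Option Int) (pnt : Int × Int) : Int × Int × Option Int :=
  let current := pnt.1
  let cnt := if pnt.2 = 1 then st.2.1 + 1 else st.2.1      -- if pnt[1] == ADD: cnt += 1
  let cnt := if pnt.2 = 0 then cnt - 1 else cnt            -- if pnt[1] == DEL: cnt -= 1
  let soc := if 0 < cnt ∧ st.2.2 = none then some current else st.2.2
  if cnt = 0 ∧ soc ≠ none then (st.1 + (current - soc.getD 0), cnt, none)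
  else (st.1, cnt, soc)

def sum_of_intersection (script : List (String × List (List (String × Int)))) : Int :=
  match (PySem.Dict.mk script).get? "ranges" with
  | none => 0                      -- Python raises KeyError here; excluded by Pre_
  | some rs =>
    let points : List (Int × Int) := rs.foldl (fun pts r =>
      match (PySem.Dict.mk r).get? "start", (PySem.Dict.mk r).get? "end" with
      | some s, some e => pts ++ [(s, 1), (e, 0)]
      | _, _ => pts)               -- Python raises KeyError on a missing key; excluded by Pre_
      []
    ((PySem.List.sorted2 points Prod.fst Prod.snd).foldl pvA_step (0, 0, none)).1

-- ===== PORT B =====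
-- sum(1 for s in xs if s <= p)
def pvB_cover (xs : List Int) (p : Int) : Int :=
  xs.foldl (fun acc s => if s ≤ p then acc + 1 else acc) 0

def sum_of_intersection_alt (script : List (String × List (List (String × Int)))) : Int :=
  match (PySem.Dict.mk script).get? "ranges" with
  | none => 0                      -- KeyError; excluded by Pre_
  | some rs =>
    let starts := rs.map (fun r => ((PySem.Dict.mk r).get? "start").getD 0)  -- getD: Pre_ guarantees the key
    let ends := rs.map (fun r => ((PySem.Dict.mk r).get? "end").getD 0)
    let points := PySem.List.sorted (PySem.Set.ofList (starts ++ ends)) (fun x => x)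
    -- points[1:] is points.drop 1 (slice with a nonnegative start)
    (points.zip (points.drop 1)).foldl (fun tot pq =>
      if pvB_cover ends pq.1 < pvB_cover starts pq.1 then tot + (pq.2 - pq.1) else tot) 0

-- ===== PRECONDITION & SPEC =====
-- Pre_ excludes exactly the inputs on which the Python A raises KeyError: a script without a
-- "ranges" key, or a range without a "start" or an "end" key.
def Pre_sum_of_intersection (script : List (String × List (List (String × Int)))) : Prop :=
  ((PySem.Dict.mk script).get? "ranges").isSome = true ∧
  ∀ r ∈ ((PySem.Dict.mk script).get? "ranges").getD [],
    ((PySem.Dict.mk r).get? "start").isSome = true ∧ ((PySem.Dict.mk r).get? "end").isSome = true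
instance (script : List (String × List (List (String × Int)))) : Decidable (Pre_sum_of_intersection script) := by
  unfold Pre_sum_of_intersection; infer_instance

def pvWitness_sum_of_intersection : (List (String × List (List (String × Int)))) :=
  [("ranges", [[("start", 1), ("end", 5)], [("start", 3), ("end", 7)], [("start", 20), ("end", 21)]])]

def Spec_sum_of_intersection (script : List (String × List (List (String × Int)))) (out : Int) : Prop := out = sum_of_intersection_alt script
instance (script : List (String × List (List (String × Int)))) (out : Int) : Decidable (Spec_sum_of_intersection script out) := by unfold Spec_sum_of_intersection; infer_instance

-- ===== CLAIM (what is proved, stated in full; the proofs are below) =====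
def Claim_equal_sum_of_intersection : Prop := ∀ (script : List (String × List (List (String × Int)))), Dom_sum_of_intersection script → Pre_sum_of_intersection script → Spec_sum_of_intersection script (sum_of_intersection script)

-- ===== LEMMAS AND PROOFS =====

-- the events of one coordinate, in the order they occur in the sorted event list: DELs first, then ADDs
def pvBlk (S E : List Int) (p : Int) : List (Int × Int) :=
  List.replicate (E.count p) (p, (0:Int)) ++ List.replicate (S.count p) (p, (1:Int))

-- common reference value: gap sum over the remaining coordinates, with a running coverage counter
def pvMid (S E : List Int) : Int → Int → List Int → Int
  | _, _, [] => 0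
  | c, p, q :: t => (if 0 < c then q - p else 0) + pvMid S E (c + (S.count q : Int) - (E.count q : Int)) q t

-- ---- A's sweep, phase by phase ----

theorem pv_delNone (p a : Int) : ∀ (k : Nat) (c : Int), c ≤ 0 →
    (List.replicate k (p, (0:Int))).foldl pvA_step (a, c, none) = (a, c - k, none) := by
  intro k
  induction k with
  | zero => intro c hc; simp
  | succ k ih =>
    intro c hc
    rw [List.replicate_succ, List.foldl_cons]
    have h1 : pvA_step (a, c, none) (p, 0) = (a, c - 1, none) := by
      simp only [pvA_step]; split_ifs <;> simp_all <;> omega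
    rw [h1, ih (c-1) (by omega)]
    simp [Prod.ext_iff]; ring

theorem pv_delSome (p a : Int) : ∀ (k : Nat) (c s : Int), 0 < c →
    (List.replicate k (p, (0:Int))).foldl pvA_step (a, c, some s) =
      (if c ≤ k then (a + (p - s), c - k, none) else (a, c - k, some s)) := by
  intro k
  induction k with
  | zero =>
    intro c s hc
    rw [if_neg (by push_cast; omega)]; simp
  | succ k ih =>
    intro c s hc
    rw [List.replicate_succ, List.foldl_cons]
    by_cases h1 : c = 1
    · have hstep : pvA_step (a, c, some s) (p, 0) = (a + (p - s), c - 1, none) := by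
        subst h1; simp [pvA_step]
      rw [hstep, pv_delNone p (a + (p - s)) k (c - 1) (by omega),
        if_pos (show c ≤ ((k+1:Nat):Int) by push_cast; omega)]
      simp [Prod.ext_iff]; push_cast; ring
    · have hstep : pvA_step (a, c, some s) (p, 0) = (a, c - 1, some s) := by
        simp only [pvA_step]; norm_num
        rw [if_neg (by omega), if_neg (by simp)]
      rw [hstep, ih (c-1) s (by omega)]
      by_cases h2 : c ≤ ((k+1:Nat):Int)
      · rw [if_pos (show c - 1 ≤ (k:Int) by push_cast at h2 ⊢; omega), if_pos h2]
        simp [Prod.ext_iff]; push_cast; ring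
      · rw [if_neg (show ¬ c - 1 ≤ (k:Int) by push_cast at h2 ⊢; omega), if_neg h2]
        simp [Prod.ext_iff]; push_cast; ring

theorem pv_addSome (p a : Int) : ∀ (m : Nat) (c s : Int), 0 < c →
    (List.replicate m (p, (1:Int))).foldl pvA_step (a, c, some s) = (a, c + m, some s) := by
  intro m
  induction m with
  | zero => intro c s hc; simp
  | succ m ih =>
    intro c s hc
    rw [List.replicate_succ, List.foldl_cons]
    have hstep : pvA_step (a, c, some s) (p, 1) = (a, c + 1, some s) := by
      simp only [pvA_step]; split_ifs <;> simp_all <;> omega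
    rw [hstep, ih (c+1) s (by omega)]
    simp [Prod.ext_iff]; push_cast; ring

theorem pv_addNone (p a : Int) : ∀ (m : Nat) (c : Int), c ≤ 0 →
    (List.replicate m (p, (1:Int))).foldl pvA_step (a, c, none) =
      (if 0 < c + m then (a, c + m, some p) else (a, c + m, none)) := by
  intro m
  induction m with
  | zero => intro c hc; rw [if_neg (by push_cast; omega)]; simp
  | succ m ih =>
    intro c hc
    rw [List.replicate_succ, List.foldl_cons]
    by_cases h1 : c = 0
    · have hstep : pvA_step (a, c, none) (p, 1) = (a, c + 1, some p) := by
        simp only [pvA_step]; split_ifs <;> simp_all <;> omega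
      rw [hstep, pv_addSome p a m (c+1) p (by omega),
        if_pos (show 0 < c + ((m+1:Nat):Int) by push_cast; omega)]
      simp [Prod.ext_iff]; push_cast; ring
    · have hstep : pvA_step (a, c, none) (p, 1) = (a, c + 1, none) := by
        simp only [pvA_step]; split_ifs <;> simp_all <;> omega
      rw [hstep, ih (c+1) (by omega)]
      by_cases h2 : 0 < c + ((m+1:Nat):Int)
      · rw [if_pos (show 0 < c + 1 + (m:Int) by push_cast at h2 ⊢; omega), if_pos h2]
        simp [Prod.ext_iff]; push_cast; ring
      · rw [if_neg (show ¬ 0 < c + 1 + (m:Int) by push_cast at h2 ⊢; omega), if_neg h2]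
        simp [Prod.ext_iff]; push_cast; ring

theorem pv_blkSome (S E : List Int) (p a c s : Int) (hc : 0 < c) :
    (pvBlk S E p).foldl pvA_step (a, c, some s) =
      (if (E.count p : Int) < c then (a, c + S.count p - E.count p, some s)
       else if 0 < c + (S.count p : Int) - E.count p then (a + (p - s), c + S.count p - E.count p, some p)
       else (a + (p - s), c + S.count p - E.count p, none)) := by
  rw [pvBlk, List.foldl_append, pv_delSome p a (E.count p) c s hc]
  by_cases h1 : (E.count p : Int) < c
  · rw [if_neg (by omega), pv_addSome p a (S.count p) _ s (by omega), if_pos h1]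
    simp [Prod.ext_iff]; ring
  · rw [if_pos (by omega), pv_addNone p _ (S.count p) _ (by omega), if_neg h1]
    by_cases h2 : 0 < c + (S.count p : Int) - E.count p
    · rw [if_pos (by omega), if_pos h2]
      simp [Prod.ext_iff]; ring
    · rw [if_neg (by omega), if_neg h2]
      simp [Prod.ext_iff]; ring

theorem pv_blkNone (S E : List Int) (p a c : Int) (hc : c ≤ 0) :
    (pvBlk S E p).foldl pvA_step (a, c, none) =
      (if 0 < c + (S.count p : Int) - E.count p then (a, c + S.count p - E.count p, some p)
       else (a, c + S.count p - E.count p, none)) := by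
  rw [pvBlk, List.foldl_append, pv_delNone p a (E.count p) c hc,
    pv_addNone p a (S.count p) _ (by omega)]
  by_cases h2 : 0 < c + (S.count p : Int) - E.count p
  · rw [if_pos (by omega), if_pos h2]
    simp [Prod.ext_iff]; ring
  · rw [if_neg (by omega), if_neg h2]
    simp [Prod.ext_iff]; ring

-- A's sweep over the grouped event list computes the reference gap sum
theorem pv_sweepMain (S E : List Int) : ∀ (qs : List Int) (a c : Int) (so : Option Int) (p : Int),
    (so = none → c ≤ 0) → (∀ s, so = some s → 0 < c) →
    c + ((qs.map (fun q => (S.count q : Int) - (E.count q : Int))).sum) = 0 →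
    ((qs.flatMap (pvBlk S E)).foldl pvA_step (a, c, so)).1
      = a + (match so with | some s => p - s | none => 0) + pvMid S E c p qs := by
  intro qs
  induction qs with
  | nil =>
    intro a c so p h1 h2 hclose
    simp at hclose
    match so with
    | none => simp [pvMid]
    | some s => exact absurd hclose (by have := h2 s rfl; omega)
  | cons q t ih =>
    intro a c so p h1 h2 hclose
    rw [List.flatMap_cons, List.foldl_append]
    simp only [List.map_cons, List.sum_cons] at hclose
    match so with
    | some s =>
      have hc : 0 < c := h2 s rfl
      rw [pv_blkSome S E q a c s hc]
      by_cases hb1 : (E.count q : Int) < c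
      · rw [if_pos hb1]
        rw [ih a _ (some s) q (by simp) (fun _ h => by cases h; omega) (by omega)]
        simp only [pvMid, if_pos hc]
        ring
      · rw [if_neg hb1]
        by_cases hb2 : 0 < c + (S.count q : Int) - E.count q
        · rw [if_pos hb2]
          rw [ih _ _ (some q) q (by simp) (fun _ h => by cases h; omega) (by omega)]
          simp only [pvMid, if_pos hc]
          ring
        · rw [if_neg hb2]
          rw [ih _ _ none q (fun _ => by omega) (by simp) (by omega)]
          simp only [pvMid, if_pos hc]
          ring
    | none =>
      have hc : c ≤ 0 := h1 rfl
      rw [pv_blkNone S E q a c hc]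
      by_cases hb2 : 0 < c + (S.count q : Int) - E.count q
      · rw [if_pos hb2]
        rw [ih _ _ (some q) q (by simp) (fun _ h => by cases h; omega) (by omega)]
        simp only [pvMid, if_neg (by omega : ¬ 0 < c)]
        ring
      · rw [if_neg hb2]
        rw [ih _ _ none q (fun _ => by omega) (by simp) (by omega)]
        simp only [pvMid, if_neg (by omega : ¬ 0 < c)]
        ring

-- ---- B's gap fold ----

theorem pv_cover_aux (p : Int) : ∀ (xs : List Int) (acc : Int),
    xs.foldl (fun acc s => if s ≤ p then acc + 1 else acc) acc = acc + (xs.countP (fun x => decide (x ≤ p)) : Int) := by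
  intro xs
  induction xs with
  | nil => intro acc; simp
  | cons x t ih =>
    intro acc
    rw [List.foldl_cons, ih, List.countP_cons]
    by_cases h : x ≤ p
    · rw [if_pos h, if_pos (by simpa using h)]
      push_cast; ring
    · rw [if_neg h, if_neg (by simpa using h)]
      push_cast; ring

theorem pv_cover_eq (xs : List Int) (p : Int) :
    pvB_cover xs p = (xs.countP (fun x => decide (x ≤ p)) : Int) := by
  rw [pvB_cover, pv_cover_aux]; ring

theorem pv_countLE_step (p q : Int) (hpq : p < q) : ∀ (L : List Int),
    (∀ x ∈ L, x ≤ q → x ≤ p ∨ x = q) →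
    (L.countP (fun x => decide (x ≤ q)) : Int) = (L.countP (fun x => decide (x ≤ p)) : Int) + L.count q := by
  intro L
  induction L with
  | nil => intro _; simp
  | cons x t ih =>
    intro hg
    have ht := ih (fun y hy => hg y (List.mem_cons_of_mem x hy))
    rw [List.countP_cons, List.countP_cons, List.count_cons]
    have hx := hg x (List.mem_cons_self)
    by_cases h1 : x ≤ p
    · rw [if_pos (by simpa using (le_of_lt (lt_of_le_of_lt h1 hpq))), if_pos (by simpa using h1)]
      have : ¬ (x == q) := by simp; omega
      simp only [this]
      push_cast
      omega
    · by_cases h2 : x = q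
      · subst h2
        rw [if_pos (by simp), if_neg (by simpa using h1)]
        simp
        push_cast
        omega
      · have hxq : ¬ x ≤ q := by
          intro hle
          rcases hx hle with h | h
          · exact h1 h
          · exact h2 h
        rw [if_neg (by simpa using hxq), if_neg (by simpa using h1)]
        have : ¬ (x == q) := by simp [h2]
        simp only [this]
        push_cast
        omega

theorem pv_bfold (S E : List Int) : ∀ (qs : List Int) (p : Int) (t0 c : Int),
    (p :: qs).Pairwise (· < ·) →
    (∀ x ∈ S, x ≤ p ∨ x ∈ qs) → (∀ x ∈ E, x ≤ p ∨ x ∈ qs) →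
    c = (S.countP (fun x => decide (x ≤ p)) : Int) - (E.countP (fun x => decide (x ≤ p)) : Int) →
    ((p :: qs).zip qs).foldl (fun tot pq =>
        if pvB_cover E pq.1 < pvB_cover S pq.1 then tot + (pq.2 - pq.1) else tot) t0
      = t0 + pvMid S E c p qs := by
  intro qs
  induction qs with
  | nil => intro p t0 c _ _ _ _; simp [pvMid]
  | cons q t ih =>
    intro p t0 c hPW hS hE hc
    have hpq : p < q := (List.pairwise_cons.mp hPW).1 q List.mem_cons_self
    have hgapS : ∀ x ∈ S, x ≤ q → x ≤ p ∨ x = q := by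
      intro x hx hle
      rcases hS x hx with h | h
      · exact Or.inl h
      · rcases List.mem_cons.mp h with h | h
        · exact Or.inr h
        · exfalso
          have := (List.pairwise_cons.mp (List.pairwise_cons.mp hPW).2).1 x h
          omega
    have hgapE : ∀ x ∈ E, x ≤ q → x ≤ p ∨ x = q := by
      intro x hx hle
      rcases hE x hx with h | h
      · exact Or.inl h
      · rcases List.mem_cons.mp h with h | h
        · exact Or.inr h
        · exfalso
          have := (List.pairwise_cons.mp (List.pairwise_cons.mp hPW).2).1 x h
          omega
    have hzip : ((p :: q :: t).zip (q :: t)) = (p, q) :: ((q :: t).zip t) := by rfl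
    rw [hzip, List.foldl_cons]
    have hstep : (if pvB_cover E p < pvB_cover S p then t0 + (q - p) else t0)
        = t0 + (if 0 < c then q - p else 0) := by
      rw [pv_cover_eq, pv_cover_eq]
      by_cases h : 0 < c
      · rw [if_pos (by omega), if_pos h]
      · rw [if_neg (by omega), if_neg h]
        ring
    rw [hstep, ih q _ (c + (S.count q : Int) - (E.count q : Int))
      (List.pairwise_cons.mp hPW).2
      (by intro x hx
          rcases hS x hx with h | h
          · exact Or.inl (by omega)
          · rcases List.mem_cons.mp h with h | h
            · exact Or.inl (by omega)
            · exact Or.inr h)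
      (by intro x hx
          rcases hE x hx with h | h
          · exact Or.inl (by omega)
          · rcases List.mem_cons.mp h with h | h
            · exact Or.inl (by omega)
            · exact Or.inr h)
      (by rw [pv_countLE_step p q hpq S hgapS, pv_countLE_step p q hpq E hgapE]
          omega)]
    simp only [pvMid]
    ring

-- ---- the sorted event list is the grouped canonical list ----

theorem pv_sorted2_eq (xs : List (Int × Int)) :
    PySem.List.sorted2 xs Prod.fst Prod.snd = PySem.List.sorted xs (fun x : Int × Int => (toLex x : Int ×ₗ Int)) := by
  have h1 : PySem.List.sorted2 xs Prod.fst Prod.snd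
      = xs.foldl (fun acc x => PySem.List.insertBy
          (fun a b => decide (a.1 < b.1) || (!decide (b.1 < a.1) && decide (a.2 < b.2))) x acc) [] := rfl
  have h2 : PySem.List.sorted xs (fun x : Int × Int => (toLex x : Int ×ₗ Int))
      = xs.foldl (fun acc x => PySem.List.insertBy
          (fun a b => decide ((toLex a : Int ×ₗ Int) < toLex b)) x acc) [] :=
    PySem.List.sorted_eq_foldl_insertBy xs _
  rw [h1, h2]
  have hb : (fun (a b : Int × Int) => decide (a.1 < b.1) || (!decide (b.1 < a.1) && decide (a.2 < b.2)))
      = (fun (a b : Int × Int) => decide ((toLex a : Int ×ₗ Int) < toLex b)) := by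
    funext a b
    by_cases hlt : a.1 < b.1
    · simp [hlt, Prod.Lex.lt_iff]
    · by_cases heq : a.1 = b.1
      · by_cases h2lt : a.2 < b.2 <;> simp [hlt, heq, h2lt, Prod.Lex.lt_iff] <;> omega
      · have : b.1 < a.1 := by omega
        simp [hlt, this, Prod.Lex.lt_iff]
        omega
  rw [hb]

theorem pv_count_blk (S E : List Int) (p : Int) (x t : Int) :
    List.count (x, t) (pvBlk S E p)
      = (if p = x ∧ t = 0 then E.count p else 0) + (if p = x ∧ t = 1 then S.count p else 0) := by
  rw [pvBlk, List.count_append, List.count_replicate, List.count_replicate]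
  by_cases h0 : p = x ∧ t = 0
  · rw [if_pos h0, if_pos (by simp [h0.1, h0.2]), if_neg (by simp [h0.1]; omega), if_neg (by omega)]
  · rw [if_neg h0, if_neg (by simp; intro a b; exact absurd ⟨a, b.symm⟩ h0)]
    by_cases h1 : p = x ∧ t = 1
    · rw [if_pos h1, if_pos (by simp [h1.1, h1.2])]
    · rw [if_neg h1, if_neg (by simp; intro a b; exact absurd ⟨a, b.symm⟩ h1)]

theorem pv_count_C (S E : List Int) (x t : Int) : ∀ (pts : List Int), pts.Nodup →
    List.count (x, t) (pts.flatMap (pvBlk S E))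
      = if x ∈ pts then (if t = 0 then E.count x else if t = 1 then S.count x else 0) else 0 := by
  intro pts
  induction pts with
  | nil => intro _; simp
  | cons p rest ih =>
    intro hnd
    rw [List.flatMap_cons, List.count_append, pv_count_blk, ih (List.nodup_cons.mp hnd).2]
    have hpn : p ∉ rest := (List.nodup_cons.mp hnd).1
    by_cases hx : p = x
    · subst hx
      have hxr : p ∉ rest := hpn
      rw [if_neg hxr, if_pos (List.mem_cons_self)]
      by_cases h0 : t = 0
      · simp [h0]
      · by_cases h1 : t = 1 <;> simp [h0, h1]
    · rw [if_neg (fun h => hx h.1), if_neg (fun h => hx h.1)]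
      by_cases hm : x ∈ rest
      · rw [if_pos hm, if_pos (List.mem_cons_of_mem p hm)]
        omega
      · rw [if_neg hm, if_neg (by
          intro h
          rcases List.mem_cons.mp h with h | h
          · exact hx h.symm
          · exact hm h)]

theorem pv_mem_blk (S E : List Int) (p : Int) (y : Int × Int) (h : y ∈ pvBlk S E p) : y.1 = p := by
  rw [pvBlk, List.mem_append] at h
  rcases h with h | h <;> rw [List.eq_of_mem_replicate h]

theorem pv_blk_pairwise (S E : List Int) (p : Int) :
    (pvBlk S E p).Pairwise (fun a b => (toLex a : Int ×ₗ Int) ≤ toLex b) := by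
  rw [pvBlk, List.pairwise_append]
  refine ⟨List.pairwise_replicate.mpr (Or.inr le_rfl), List.pairwise_replicate.mpr (Or.inr le_rfl), ?_⟩
  intro a ha b hb
  rw [List.eq_of_mem_replicate ha, List.eq_of_mem_replicate hb]
  rw [Prod.Lex.le_iff]
  right
  exact ⟨rfl, by norm_num⟩

theorem pv_C_pairwise (S E : List Int) : ∀ (pts : List Int), pts.Pairwise (· < ·) →
    (pts.flatMap (pvBlk S E)).Pairwise (fun a b => (toLex a : Int ×ₗ Int) ≤ toLex b) := by
  intro pts
  induction pts with
  | nil => intro _; simp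
  | cons p rest ih =>
    intro hpw
    rw [List.flatMap_cons, List.pairwise_append]
    refine ⟨pv_blk_pairwise S E p, ih (List.pairwise_cons.mp hpw).2, ?_⟩
    intro a ha b hb
    rcases List.mem_flatMap.mp hb with ⟨q, hq, hbq⟩
    have h1 : a.1 = p := pv_mem_blk S E p a ha
    have h2 : b.1 = q := pv_mem_blk S E q b hbq
    have : p < q := (List.pairwise_cons.mp hpw).1 q hq
    rw [Prod.Lex.le_iff]
    left
    simpa [h1, h2]

theorem pv_count_points_del (sfun efun : (List (String × Int)) → Int) (x : Int) : ∀ (rs : List (List (String × Int))),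
    List.count (x, (0:Int)) (rs.flatMap (fun r => [(sfun r, (1:Int)), (efun r, (0:Int))]))
      = (rs.map efun).count x := by
  intro rs
  induction rs with
  | nil => simp
  | cons r rest ih =>
    rw [List.flatMap_cons, List.count_append, ih, List.map_cons, List.count_cons]
    simp only [List.count_cons, List.count_nil, beq_iff_eq, Prod.mk.injEq]
    by_cases h : efun r = x <;> simp [h] <;> omega

theorem pv_count_points_add (sfun efun : (List (String × Int)) → Int) (x : Int) : ∀ (rs : List (List (String × Int))),
    List.count (x, (1:Int)) (rs.flatMap (fun r => [(sfun r, (1:Int)), (efun r, (0:Int))]))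
      = (rs.map sfun).count x := by
  intro rs
  induction rs with
  | nil => simp
  | cons r rest ih =>
    rw [List.flatMap_cons, List.count_append, ih, List.map_cons, List.count_cons]
    simp only [List.count_cons, List.count_nil, beq_iff_eq, Prod.mk.injEq]
    by_cases h : sfun r = x <;> simp [h] <;> omega

theorem pv_count_points_other (sfun efun : (List (String × Int)) → Int) (x t : Int) (h0 : t ≠ 0) (h1 : t ≠ 1) :
    ∀ (rs : List (List (String × Int))),
    List.count (x, t) (rs.flatMap (fun r => [(sfun r, (1:Int)), (efun r, (0:Int))])) = 0 := by
  intro rs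
  induction rs with
  | nil => simp
  | cons r rest ih =>
    rw [List.flatMap_cons, List.count_append, ih]
    rw [List.count_cons, List.count_cons, List.count_nil]
    rw [if_neg (by simp; intro _; omega), if_neg (by simp; intro _; omega)]

-- ---- counting helpers ----

theorem pv_sum_ite_one (x : Int) : ∀ (ps : List Int), ps.Nodup → x ∈ ps →
    (ps.map (fun q => if q = x then (1:Int) else 0)).sum = 1 := by
  intro ps
  induction ps with
  | nil => intro _ h; simp at h
  | cons p rest ih =>
    intro hnd hm
    rw [List.map_cons, List.sum_cons]
    by_cases h : p = x
    · subst h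
      rw [if_pos rfl]
      have : (rest.map (fun q => if q = p then (1:Int) else 0)).sum = 0 := by
        apply List.sum_eq_zero
        intro y hy
        rcases List.mem_map.mp hy with ⟨q, hq, hqy⟩
        have : q ≠ p := fun he => (List.nodup_cons.mp hnd).1 (he ▸ hq)
        rw [if_neg this] at hqy
        omega
      rw [this]
      norm_num
    · rw [if_neg h, ih (List.nodup_cons.mp hnd).2
        (by rcases List.mem_cons.mp hm with hm | hm
            · exact absurd hm.symm h
            · exact hm)]
      ring

theorem pv_sum_count : ∀ (L : List Int) (ps : List Int), ps.Nodup → (∀ y ∈ L, y ∈ ps) →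
    (ps.map (fun q => (L.count q : Int))).sum = L.length := by
  intro L
  induction L with
  | nil => intro ps _ _; simp
  | cons x L' ih =>
    intro ps hnd hmem
    have h1 : (ps.map (fun q => (List.count q (x :: L') : Int)))
        = ps.map (fun q => (List.count q L' : Int) + if x = q then (1:Int) else 0) := by
      apply List.map_congr_left
      intro q _
      rw [List.count_cons]
      by_cases h : x = q
      · rw [if_pos h, if_pos (by simp [h])]
        push_cast; ring
      · rw [if_neg h, if_neg (by simp [h])]
        push_cast; ring
    rw [h1, List.sum_map_add, ih ps hnd (fun y hy => hmem y (List.mem_cons_of_mem x hy))]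
    have h2 : (ps.map (fun q => if x = q then (1:Int) else 0)).sum = 1 := by
      have heq : (ps.map (fun q => if x = q then (1:Int) else 0))
          = ps.map (fun q => if q = x then (1:Int) else 0) := by
        apply List.map_congr_left
        intro q _
        by_cases h : q = x
        · subst h; simp
        · rw [if_neg (fun he => h he.symm), if_neg h]
      rw [heq]
      exact pv_sum_ite_one x ps hnd (hmem x List.mem_cons_self)
    rw [h2, List.length_cons]
    push_cast; ring

theorem pv_sum_map_sub (f g : Int → Int) : ∀ (l : List Int),
    (l.map (fun q => f q - g q)).sum = (l.map f).sum - (l.map g).sum := by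
  intro l
  induction l with
  | nil => simp
  | cons x t ih => simp [ih]; ring

theorem pv_countP_le_min (m : Int) : ∀ (L : List Int), (∀ x ∈ L, m ≤ x) →
    L.countP (fun x => decide (x ≤ m)) = L.count m := by
  intro L
  induction L with
  | nil => intro _; simp
  | cons x t ih =>
    intro hm
    rw [List.countP_cons, List.count_cons, ih (fun y hy => hm y (List.mem_cons_of_mem x hy))]
    have hx := hm x List.mem_cons_self
    by_cases h : x = m
    · rw [if_pos (by simp [h]), if_pos (by simp [h])]
    · rw [if_neg (by simp; omega), if_neg (by simp [h])]

-- ---- A's points loop, under Pre_ ----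

theorem pv_pointsEq : ∀ (rs : List (List (String × Int))) (acc : List (Int × Int)),
    (∀ r ∈ rs, ((PySem.Dict.mk r).get? "start").isSome = true ∧ ((PySem.Dict.mk r).get? "end").isSome = true) →
    rs.foldl (fun pts r =>
      match (PySem.Dict.mk r).get? "start", (PySem.Dict.mk r).get? "end" with
      | some s, some e => pts ++ [(s, 1), (e, 0)]
      | _, _ => pts) acc
    = acc ++ rs.flatMap (fun r => [(((PySem.Dict.mk r).get? "start").getD 0, (1:Int)),
                                   (((PySem.Dict.mk r).get? "end").getD 0, (0:Int))]) := by
  intro rs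
  induction rs with
  | nil => intro acc _; simp
  | cons r rest ih =>
    intro acc hp
    obtain ⟨hs, he⟩ := hp r List.mem_cons_self
    obtain ⟨s, hs⟩ := Option.isSome_iff_exists.mp hs
    obtain ⟨e, he⟩ := Option.isSome_iff_exists.mp he
    rw [List.foldl_cons, List.flatMap_cons]
    have hstep : (match (PySem.Dict.mk r).get? "start", (PySem.Dict.mk r).get? "end" with
        | some s, some e => acc ++ [(s, (1:Int)), (e, (0:Int))]
        | _, _ => acc) = acc ++ [(s, (1:Int)), (e, (0:Int))] := by
      rw [hs, he]
    rw [hstep, ih _ (fun r' hr' => hp r' (List.mem_cons_of_mem r hr'))]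
    rw [hs, he]
    simp

-- ===== VERDICT (by name: the statement is the Claim_ definition above) =====
theorem sum_of_intersection_spec : Claim_equal_sum_of_intersection := by
  intro script _ hpre
  obtain ⟨h1, h2⟩ := hpre
  unfold Spec_sum_of_intersection sum_of_intersection sum_of_intersection_alt
  obtain ⟨rs, hrg⟩ := Option.isSome_iff_exists.mp h1
  rw [hrg] at h2 ⊢
  simp only [Option.getD_some] at h2
  dsimp only
  -- abbreviations
  set sfun : List (String × Int) → Int := fun r => ((PySem.Dict.mk r).get? "start").getD 0 with hsfun
  set efun : List (String × Int) → Int := fun r => ((PySem.Dict.mk r).get? "end").getD 0 with hefun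
  set S := rs.map sfun with hS
  set E := rs.map efun with hE
  set pts := PySem.List.sorted (PySem.Set.ofList (S ++ E)) (fun x => x) with hpts
  -- A's points list
  rw [pv_pointsEq rs [] h2, List.nil_append]
  set points := rs.flatMap (fun r => [(sfun r, (1:Int)), (efun r, (0:Int))]) with hpoints
  -- facts about pts
  have hptsPW : pts.Pairwise (· < ·) := PySem.List.sorted_ofList_pairwise_lt (S ++ E)
  have hptsND : pts.Nodup := hptsPW.imp (fun h => ne_of_lt h)
  have hptsMem : ∀ x, x ∈ pts ↔ x ∈ S ++ E := by
    intro x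
    rw [hpts, PySem.List.mem_sorted, PySem.Set.mem_ofList]
  -- the sorted event list is the grouped canonical list
  have hsorted : PySem.List.sorted2 points Prod.fst Prod.snd = pts.flatMap (pvBlk S E) := by
    rw [pv_sorted2_eq]
    apply PySem.List.eq_of_perm_of_pairwise_le_of_injective
      (fun x : Int × Int => (toLex x : Int ×ₗ Int)) toLex.injective
    · apply (PySem.List.sorted_perm points _ false).trans
      rw [List.perm_iff_count]
      rintro ⟨x, t⟩
      rw [pv_count_C S E x t pts hptsND]
      by_cases ht0 : t = 0
      · subst ht0
        rw [pv_count_points_del sfun efun x rs]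
        by_cases hm : x ∈ pts
        · rw [if_pos hm]; simp
          rw [hE]
        · rw [if_neg hm]
          have : x ∉ E := fun hx => hm ((hptsMem x).mpr (List.mem_append.mpr (Or.inr hx)))
          rw [← hE, List.count_eq_zero.mpr this]
      · by_cases ht1 : t = 1
        · subst ht1
          rw [pv_count_points_add sfun efun x rs]
          by_cases hm : x ∈ pts
          · rw [if_pos hm]; simp [ht0]
            rw [hS]
          · rw [if_neg hm]
            have : x ∉ S := fun hx => hm ((hptsMem x).mpr (List.mem_append.mpr (Or.inl hx)))
            rw [← hS, List.count_eq_zero.mpr this]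
        · rw [pv_count_points_other sfun efun x t ht0 ht1 rs]
          simp [ht0, ht1]
    · exact PySem.List.sorted_pairwise points _
    · exact pv_C_pairwise S E pts hptsPW
  rw [hsorted]
  -- lengths for the closing hypothesis
  have hlen : (pts.map (fun q => (S.count q : Int) - (E.count q : Int))).sum = 0 := by
    rw [pv_sum_map_sub (fun q => (S.count q : Int)) (fun q => (E.count q : Int)) pts]
    rw [pv_sum_count S pts hptsND (fun y hy => (hptsMem y).mpr (List.mem_append.mpr (Or.inl hy)))]
    rw [pv_sum_count E pts hptsND (fun y hy => (hptsMem y).mpr (List.mem_append.mpr (Or.inr hy)))]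
    rw [hS, hE, List.length_map, List.length_map]
    ring
  -- both sides
  cases hp0 : pts with
  | nil =>
    have hSE : S ++ E = [] := by
      by_contra hne
      rcases List.exists_mem_of_ne_nil _ hne with ⟨y, hy⟩
      have := (hptsMem y).mpr hy
      rw [hp0] at this
      exact absurd this (List.not_mem_nil)
    have hSnil : S = [] := by
      rcases List.append_eq_nil_iff.mp hSE with ⟨h, _⟩; exact h
    have hrs : rs = [] := List.map_eq_nil_iff.mp (hS ▸ hSnil)
    subst hrs
    simp [pvMid]
  | cons p0 qs =>
    rw [hp0] at hlen
    have hsweep := pv_sweepMain S E (p0 :: qs) 0 0 none p0 (fun _ => le_rfl)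
      (fun s h => by cases h) (by simpa using hlen)
    rw [hsweep]
    have hdrop : (p0 :: qs).drop 1 = qs := rfl
    rw [hdrop]
    have hmin : ∀ y ∈ S ++ E, p0 ≤ y := by
      intro y hy
      have := PySem.List.key_head_sorted_le (PySem.Set.ofList (S ++ E)) (fun x => x) (hp0 ▸ hpts.symm)
      exact this y ((PySem.Set.mem_ofList _ y).mpr hy)
    have hbf := pv_bfold S E qs p0 0
      ((S.count p0 : Int) - (E.count p0 : Int))
      (hp0 ▸ hptsPW)
      (by intro x hx
          have := (hptsMem x).mpr (List.mem_append.mpr (Or.inl hx))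
          rw [hp0] at this
          rcases List.mem_cons.mp this with h | h
          · exact Or.inl (le_of_eq h)
          · exact Or.inr h)
      (by intro x hx
          have := (hptsMem x).mpr (List.mem_append.mpr (Or.inr hx))
          rw [hp0] at this
          rcases List.mem_cons.mp this with h | h
          · exact Or.inl (le_of_eq h)
          · exact Or.inr h)
      (by rw [pv_countP_le_min p0 S (fun y hy => hmin y (List.mem_append.mpr (Or.inl hy))),
              pv_countP_le_min p0 E (fun y hy => hmin y (List.mem_append.mpr (Or.inr hy)))])
    rw [hbf]
    simp only [pvMid]
    norm_num
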